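-- pv_equiv track=rewrite | github.com/minzoovv/malangmalang-brain | algorithmbook/kakao6.py | check_fixable
-- ===== SOURCE A (Python) =====
-- def check_fixable(n, members, weak):
--     for i in range(len(weak)):
--         linear_dist = get_linear_dist(n, weak, i)
--         for member in members:
--             coverage = linear_dist[0] + member
--             # can cover all
--             if coverage >= linear_dist[len(linear_dist)-1]:
--                 linear_dist = []
--                 break
--
--             else:
--                 for j in range(len(linear_dist)):
--                     if coverage < linear_dist[j]:
--                         linear_dist = linear_dist[j:]
--                         break
--
--         if not linear_dist:
--             return True
--
--     return False
--
-- def get_linear_dist(n, weak, start_idx):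
--     linear_dist = []
--     for i in range(start_idx, len(weak)):
--         linear_dist.append(weak[i])
--
--     for i in range(0, start_idx):
--         linear_dist.append(weak[i] + n)
--
--     return linear_dist
-- ===== SOURCE B (Python) =====
-- def _val(n, weak, W, t):
--     # value of the rotated weak-point line at absolute index t (i <= t < i+W)
--     return weak[t % W] + (n if t >= W else 0)
--
-- def check_fixable(n, members, weak):
--     W = len(weak)
--     for i in range(W):
--         last = _val(n, weak, W, i + W - 1)
--         pos = i
--         covered = False
--         for m in members:
--             cov = _val(n, weak, W, pos) + m
--             if cov >= last:
--                 covered = True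
--                 break
--             while _val(n, weak, W, pos) <= cov:
--                 pos += 1
--         if covered:
--             return True
--     return False
-- ===== Notes on version B (the rewrite author's own statement) =====
-- stated objective: faster
-- what changed: B replaces A's per-rotation list rebuilding and repeated list slicing with an arithmetic index view of the rotated circle (value computed on demand via modular index) and a monotone pointer that only advances, so the inner per-member rescans of list prefixes disappear.
import Mathlib
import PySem

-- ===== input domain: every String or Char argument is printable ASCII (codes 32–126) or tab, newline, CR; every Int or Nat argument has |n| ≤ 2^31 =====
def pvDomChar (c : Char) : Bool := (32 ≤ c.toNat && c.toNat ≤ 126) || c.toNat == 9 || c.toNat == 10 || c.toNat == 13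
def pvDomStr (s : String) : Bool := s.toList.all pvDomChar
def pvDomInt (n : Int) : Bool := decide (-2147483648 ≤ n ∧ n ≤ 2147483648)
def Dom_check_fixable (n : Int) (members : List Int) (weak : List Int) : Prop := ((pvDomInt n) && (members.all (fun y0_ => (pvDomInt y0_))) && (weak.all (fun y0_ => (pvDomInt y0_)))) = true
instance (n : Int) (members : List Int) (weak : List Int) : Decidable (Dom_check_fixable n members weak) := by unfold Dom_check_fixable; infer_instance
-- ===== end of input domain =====

-- B replaces A's per-rotation list rebuilding and repeated slicing with an arithmetic
-- index view of the rotated circle and a monotone advancing pointer (objective: faster).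

-- ===== PORT A =====
-- get_linear_dist: two append loops building the rotated list
def get_linear_dist (n : Int) (weak : List Int) (start_idx : Nat) : List Int :=
  let ld := (List.range' start_idx (weak.length - start_idx)).foldl
              (fun acc i => acc ++ [weak.getD i 0]) []
  (List.range start_idx).foldl (fun acc i => acc ++ [weak.getD i 0 + n]) ld

-- 'for j in range(len(linear_dist)): if coverage < linear_dist[j]: … break'
def aScan (cov : Int) (ld : List Int) : List Nat → Option Nat
  | [] => none
  | j :: rest => if cov < ld.getD j 0 then some j else aScan cov ld rest

-- the 'for member in members' loop; [] encodes the 'linear_dist = []; break' exit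
def aMember : List Int → List Int → List Int
  | [], ld => ld
  | m :: rest, ld =>
    let cov := ld.getD 0 0 + m
    if ld.getD (ld.length - 1) 0 ≤ cov then []
    else
      match aScan cov ld (List.range ld.length) with
      | some j => aMember rest (ld.drop j)    -- linear_dist[j:] with 0 ≤ j < len
      | none => aMember rest ld

-- the 'for i in range(len(weak))' loop with early 'return True'
def aOuter (n : Int) (members : List Int) (weak : List Int) : List Nat → Bool
  | [] => false
  | i :: rest =>
    let ld := aMember members (get_linear_dist n weak i)
    if ld.isEmpty then true else aOuter n members weak rest

def check_fixable (n : Int) (members : List Int) (weak : List Int) : Bool :=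
  aOuter n members weak (List.range weak.length)

-- ===== PORT B =====
-- _val(n, weak, W, t): rotated value at absolute index t, computed arithmetically
def bVal (n : Int) (weak : List Int) (W : Nat) (t : Nat) : Int :=
  weak.getD (t % W) 0 + (if W ≤ t then n else 0)

-- 'while _val(...) <= cov: pos += 1'; fuel only makes the loop total (W always suffices)
def bAdvance (n : Int) (weak : List Int) (W : Nat) (cov : Int) : Nat → Nat → Nat
  | 0, pos => pos
  | fuel + 1, pos =>
    if bVal n weak W pos ≤ cov then bAdvance n weak W cov fuel (pos + 1) else pos

-- the 'for m in members' loop; none encodes 'covered = True; break'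
def bMember (n : Int) (weak : List Int) (W : Nat) (last : Int) : List Int → Nat → Option Nat
  | [], pos => some pos
  | m :: rest, pos =>
    let cov := bVal n weak W pos + m
    if last ≤ cov then none
    else bMember n weak W last rest (bAdvance n weak W cov W pos)

def bOuter (n : Int) (members : List Int) (weak : List Int) (W : Nat) : List Nat → Bool
  | [] => false
  | i :: rest =>
    match bMember n weak W (bVal n weak W (i + W - 1)) members i with
    | none => true
    | some _ => bOuter n members weak W rest

def check_fixable_alt (n : Int) (members : List Int) (weak : List Int) : Bool :=
  bOuter n members weak weak.length (List.range weak.length)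

-- ===== PRECONDITION & SPEC =====
def Spec_check_fixable (n : Int) (members : List Int) (weak : List Int) (out : Bool) : Prop := out = check_fixable_alt n members weak
instance (n : Int) (members : List Int) (weak : List Int) (out : Bool) : Decidable (Spec_check_fixable n members weak out) := by unfold Spec_check_fixable; infer_instance

-- ===== CLAIM (what is proved, stated in full; the proofs are below) =====
def Claim_equal_check_fixable : Prop := ∀ (n : Int) (members : List Int) (weak : List Int), Dom_check_fixable n members weak → Spec_check_fixable n members weak (check_fixable n members weak)

-- ===== LEMMAS AND PROOFS =====

theorem gld_eq (n : Int) (weak : List Int) (i : Nat) :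
    get_linear_dist n weak i =
      (List.range' i (weak.length - i)).map (fun t => weak.getD t 0) ++
      (List.range i).map (fun t => weak.getD t 0 + n) := by
  unfold get_linear_dist
  rw [PySem.List.foldl_append_singleton_eq_map, PySem.List.foldl_append_singleton_eq_map,
      List.nil_append]

theorem gld_length (n : Int) (weak : List Int) (i : Nat) (hi : i ≤ weak.length) :
    (get_linear_dist n weak i).length = weak.length := by
  simp [gld_eq]; omega

theorem gld_getD (n : Int) (weak : List Int) (i k : Nat) (hi : i < weak.length)
    (hk : k < weak.length) :
    (get_linear_dist n weak i).getD k 0 = bVal n weak weak.length (i + k) := by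
  rw [gld_eq]
  rcases lt_or_ge k (weak.length - i) with h | h
  · rw [List.getD_eq_getElem _ _ (by simp; omega), List.getElem_append_left (by simp [h])]
    have : i + k < weak.length := by omega
    simp [bVal, Nat.mod_eq_of_lt this]
    omega
  · rw [List.getD_eq_getElem _ _ (by simp; omega), List.getElem_append_right (by simp [h])]
    have h2 : weak.length ≤ i + k := by omega
    have h3 : (i + k) % weak.length = i + k - weak.length := by
      rw [Nat.mod_eq_sub_mod h2, Nat.mod_eq_of_lt (by omega)]
    simp [bVal, h3, h2]
    congr 2
    omega

theorem getD_drop (l : List Int) (k j : Nat) (h : k + j < l.length) :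
    (l.drop k).getD j 0 = l.getD (k + j) 0 := by
  rw [List.getD_eq_getElem _ _ (by simp; omega), List.getD_eq_getElem _ _ h,
      List.getElem_drop]

theorem aScan_range' (cov : Int) (ld : List Int) :
    ∀ (j s m : Nat), j < m →
    (∀ t, t < j → ld.getD (s + t) 0 ≤ cov) → cov < ld.getD (s + j) 0 →
    aScan cov ld (List.range' s m) = some (s + j) := by
  intro j
  induction j with
  | zero =>
    intro s m hm _ hcov
    obtain ⟨m', rfl⟩ : ∃ m', m = m' + 1 := ⟨m - 1, by omega⟩
    simp only [Nat.add_zero] at hcov ⊢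
    rw [List.range'_succ]
    simp only [aScan, if_pos hcov]
  | succ j ih =>
    intro s m hm hmin hcov
    obtain ⟨m', rfl⟩ : ∃ m', m = m' + 1 := ⟨m - 1, by omega⟩
    have h0 : ld.getD s 0 ≤ cov := by simpa using hmin 0 (by omega)
    rw [List.range'_succ]
    simp only [aScan, if_neg (not_lt.mpr h0)]
    have hmin' : ∀ t, t < j → ld.getD (s + 1 + t) 0 ≤ cov := by
      intro t ht
      have := hmin (t + 1) (by omega)
      rw [show s + 1 + t = s + (t + 1) by omega]; exact this
    have hcov' : cov < ld.getD (s + 1 + j) 0 := by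
      rw [show s + 1 + j = s + (j + 1) by omega]; exact hcov
    rw [ih (s + 1) m' (by omega) hmin' hcov']
    congr 1; omega

theorem bAdvance_eq (n : Int) (weak : List Int) (W cov : _) :
    ∀ (j : Nat) (pos fuel : Nat), j ≤ fuel →
    (∀ t, t < j → bVal n weak W (pos + t) ≤ cov) → cov < bVal n weak W (pos + j) →
    bAdvance n weak W cov fuel pos = pos + j := by
  intro j
  induction j with
  | zero =>
    intro pos fuel _ _ hj
    cases fuel with
    | zero => simp [bAdvance]
    | succ f =>
      simp only [Nat.add_zero] at hj
      simp [bAdvance, if_neg (not_le.mpr hj)]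
  | succ j ih =>
    intro pos fuel hfuel hmin hj
    obtain ⟨f, rfl⟩ : ∃ f, fuel = f + 1 := ⟨fuel - 1, by omega⟩
    have h0 : bVal n weak W pos ≤ cov := by simpa using hmin 0 (by omega)
    simp only [bAdvance, if_pos h0]
    have hmin' : ∀ t, t < j → bVal n weak W (pos + 1 + t) ≤ cov := by
      intro t ht
      have := hmin (t + 1) (by omega)
      rw [show pos + 1 + t = pos + (t + 1) by omega]; exact this
    have hj' : cov < bVal n weak W (pos + 1 + j) := by
      rw [show pos + 1 + j = pos + (j + 1) by omega]; exact hj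
    rw [ih (pos + 1) f (by omega) hmin' hj']
    omega

theorem member_corr (n : Int) (weak : List Int) (i : Nat) (hi : i < weak.length) :
    ∀ (members : List Int) (k : Nat), k < weak.length →
    (aMember members ((get_linear_dist n weak i).drop k) = []
      ↔ (bMember n weak weak.length (bVal n weak weak.length (i + weak.length - 1))
           members (i + k)).isNone) := by
  intro members
  induction members with
  | nil =>
    intro k hk
    have hne : (get_linear_dist n weak i).drop k ≠ [] := by
      simp [List.drop_eq_nil_iff, gld_length n weak i (le_of_lt hi)]; omega
    simp [aMember, bMember, hne]
  | cons m rest ih =>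
    intro k hk
    set W := weak.length with hW
    set rot := get_linear_dist n weak i with hrot
    have hlen : rot.length = W := gld_length n weak i (le_of_lt hi)
    have hdlen : (rot.drop k).length = W - k := by simp [hlen]
    have hget : ∀ j, k + j < W → (rot.drop k).getD j 0 = bVal n weak W (i + (k + j)) := by
      intro j hj
      rw [getD_drop _ _ _ (by omega : k + j < rot.length), gld_getD n weak i (k + j) hi hj]
    have hcov : (rot.drop k).getD 0 0 + m = bVal n weak W (i + k) + m := by
      rw [show (rot.drop k).getD 0 0 = bVal n weak W (i + (k + 0)) from hget 0 (by omega)]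
      simp
    have hlast : (rot.drop k).getD ((rot.drop k).length - 1) 0 = bVal n weak W (i + W - 1) := by
      rw [hdlen, show (rot.drop k).getD (W - k - 1) 0 = bVal n weak W (i + (k + (W - k - 1))) from
        hget (W - k - 1) (by omega)]
      congr 1; omega
    set cov := bVal n weak W (i + k) + m with hcovdef
    by_cases hbr : bVal n weak W (i + W - 1) ≤ cov
    · have e1 : aMember (m :: rest) (rot.drop k) = [] := by
        unfold aMember
        simp only [hlast, hcov, if_pos hbr]
      have e2 : bMember n weak W (bVal n weak W (i + W - 1)) (m :: rest) (i + k) = none := by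
        unfold bMember
        simp only [← hcovdef, if_pos hbr]
      rw [e1, e2]; simp
    · -- not covered: both advance to the first index with a strictly larger value
      rw [not_le] at hbr
      have hexP : ∃ j, cov < (rot.drop k).getD j 0 := by
        refine ⟨W - k - 1, ?_⟩
        rw [hget (W - k - 1) (by omega), show i + (k + (W - k - 1)) = i + W - 1 by omega]
        exact hbr
      classical
      have hjcov : cov < (rot.drop k).getD (Nat.find hexP) 0 := Nat.find_spec hexP
      have hjmin : ∀ t, t < Nat.find hexP → (rot.drop k).getD t 0 ≤ cov := by
        intro t ht
        exact not_lt.mp (Nat.find_min hexP ht)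
      have hjW : k + Nat.find hexP < W := by
        have h1 : cov < (rot.drop k).getD (W - k - 1) 0 := by
          rw [hget (W - k - 1) (by omega), show i + (k + (W - k - 1)) = i + W - 1 by omega]
          exact hbr
        have := Nat.find_min' hexP h1
        omega
      set j := Nat.find hexP with hjdef
      have hscan : aScan cov (rot.drop k) (List.range (rot.drop k).length) = some j := by
        rw [List.range_eq_range']
        have := aScan_range' cov (rot.drop k) j 0 (rot.drop k).length (by omega)
          (fun t ht => by simpa using hjmin t ht) (by simpa using hjcov)
        simpa using this
      have hadv : bAdvance n weak W cov W (i + k) = i + (k + j) := by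
        rw [bAdvance_eq n weak W cov j (i + k) W (by omega)
          (fun t ht => by rw [show i + k + t = i + (k + t) by omega, ← hget t (by omega)]
                          exact hjmin t ht)
          (by rw [show i + k + j = i + (k + j) by omega, ← hget j hjW]; exact hjcov)]
        omega
      have hdrop : (rot.drop k).drop j = rot.drop (k + j) := by
        rw [List.drop_drop]
      have e1 : aMember (m :: rest) (rot.drop k) = aMember rest (rot.drop (k + j)) := by
        conv_lhs => rw [aMember]
        simp only [hlast, hcov, if_neg (not_le.mpr hbr), hscan, hdrop]
      have e2 : bMember n weak W (bVal n weak W (i + W - 1)) (m :: rest) (i + k)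
          = bMember n weak W (bVal n weak W (i + W - 1)) rest (i + (k + j)) := by
        conv_lhs => rw [bMember]
        simp only [← hcovdef, if_neg (not_le.mpr hbr), hadv]
      rw [e1, e2]
      exact ih (k + j) (by omega)

theorem outer_corr (n : Int) (members : List Int) (weak : List Int) :
    ∀ idxs : List Nat, (∀ i ∈ idxs, i < weak.length) →
    aOuter n members weak idxs = bOuter n members weak weak.length idxs := by
  intro idxs
  induction idxs with
  | nil => intro _; rfl
  | cons i rest ih =>
    intro hmem
    have hi : i < weak.length := hmem i (by simp)
    have hcorr := member_corr n weak i hi members 0 (by omega)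
    simp only [List.drop_zero, Nat.add_zero] at hcorr
    simp only [aOuter, bOuter]
    rcases hopt : bMember n weak weak.length (bVal n weak weak.length (i + weak.length - 1))
        members i with _ | p
    · have : aMember members (get_linear_dist n weak i) = [] := by
        rw [hcorr, hopt]; rfl
      simp [this]
    · have : ¬ aMember members (get_linear_dist n weak i) = [] := by
        intro h; rw [hcorr, hopt] at h; simp at h
      simp only [List.isEmpty_iff, if_neg this]
      exact ih (fun x hx => hmem x (by simp [hx]))

-- ===== VERDICT (by name: the statement is the Claim_ definition above) =====
theorem check_fixable_spec : Claim_equal_check_fixable := by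
  intro n members weak _
  unfold Spec_check_fixable check_fixable check_fixable_alt
  exact outer_corr n members weak (List.range weak.length) (by simp)
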